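-- pv_equiv track=rewrite | github.com/ndtands/Algorithm_and_data_structer | Final_Semeter/greedy.py | MinGroup
-- ===== SOURCE A (Python) =====
-- def MinGroup(C,L):
--     C.sort()
--     R =[]
--     n = len(C)
--     i=0
--     while i <n:
--         [l,r]=[C[i],C[i]+L]
--         R.append(l)
--         i+=1
--         while i<n and C[i]<=r:
--             i+=1
--     return len(R)
-- ===== SOURCE B (Python) =====
-- def MinGroup(C, L):
--     C.sort()
--
--     def first_above(lo, hi, r):
--         # binary search: least index in [lo, hi) with C[idx] > r, else hi
--         while lo < hi:
--             mid = (lo + hi) // 2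
--             if C[mid] <= r:
--                 lo = mid + 1
--             else:
--                 hi = mid
--         return lo
--
--     n = len(C)
--     count = 0
--     i = 0
--     while i < n:
--         count += 1
--         i = first_above(i + 1, n, C[i] + L)
--     return count
-- ===== Notes on version B (the rewrite author's own statement) =====
-- stated objective: alternative
-- what changed: Replaced A's inner linear skip-scan over group members by a hand-written binary search over index ranges: each iteration jumps directly to the least index whose value exceeds the group leader plus L, so the post-sort phase is O(g log n) in the number of groups g instead of touching every element.
import Mathlib
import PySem

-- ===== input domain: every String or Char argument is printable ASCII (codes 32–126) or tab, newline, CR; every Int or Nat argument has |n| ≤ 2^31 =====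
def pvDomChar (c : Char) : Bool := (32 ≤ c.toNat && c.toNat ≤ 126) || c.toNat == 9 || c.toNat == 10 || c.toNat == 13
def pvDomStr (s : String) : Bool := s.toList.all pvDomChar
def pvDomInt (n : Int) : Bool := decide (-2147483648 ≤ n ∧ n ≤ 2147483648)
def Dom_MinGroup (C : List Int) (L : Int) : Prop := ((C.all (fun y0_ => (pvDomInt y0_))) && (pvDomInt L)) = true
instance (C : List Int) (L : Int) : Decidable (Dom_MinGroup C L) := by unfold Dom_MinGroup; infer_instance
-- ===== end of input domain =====

-- B replaces A's inner linear skip-scan by a binary search jump to the next group leader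
-- (same return value; both A and B sort C in place in Python — equivalence is about the return value).
-- ===== PORT A =====
-- inner while loop of A: advance past points ≤ r
def pvDropRun (r : Int) : List Int → List Int
  | [] => []
  | x :: xs => if x ≤ r then pvDropRun r xs else x :: xs

theorem pvDropRun_len_le (r : Int) (xs : List Int) : (pvDropRun r xs).length ≤ xs.length := by
  induction xs with
  | nil => simp [pvDropRun]
  | cons x xs ih =>
    simp only [pvDropRun]
    split
    · exact Nat.le_succ_of_le ih
    · simp

-- outer while loop of A: take group leader C[i], append, skip points ≤ C[i]+L
def pvLoopA (L : Int) : List Int → Int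
  | [] => 0
  | x :: xs => 1 + pvLoopA L (pvDropRun (x + L) xs)
termination_by xs => xs.length
decreasing_by
  exact Nat.lt_succ_of_le (pvDropRun_len_le _ _)

def MinGroup (C : List Int) (L : Int) : Int :=
  pvLoopA L (PySem.List.sorted C (fun x => x) false)

-- ===== PORT B =====
-- B's helper first_above: binary search for the least index in [lo,hi) with S[idx] > r
theorem pvMidDec1 (lo hi : Nat) (h : lo < hi) : hi - ((lo + hi) / 2 + 1) < hi - lo := by omega

theorem pvMidDec2 (lo hi : Nat) (h : lo < hi) : (lo + hi) / 2 - lo < hi - lo := by omega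

def pvBS (S : List Int) (r : Int) (lo hi : Nat) : Nat :=
  if _h : lo < hi then
    let mid := (lo + hi) / 2
    if S.getD mid 0 ≤ r then pvBS S r (mid + 1) hi else pvBS S r lo mid
  else lo
termination_by hi - lo
decreasing_by
  · exact pvMidDec1 lo hi _h
  · exact pvMidDec2 lo hi _h

theorem pvBS_ge (S : List Int) (r : Int) (lo hi : Nat) : lo ≤ pvBS S r lo hi := by
  induction lo, hi using pvBS.induct S r with
  | case1 lo hi h mid hle ih =>
    rw [pvBS]; simp only [h, dite_true]
    simp only [mid] at hle ih ⊢
    rw [if_pos hle]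
    exact le_trans (by omega) ih
  | case2 lo hi h mid hgt ih => rw [pvBS]; simp only [h, dite_true]; simp only [mid] at hgt ih ⊢; rw [if_neg hgt]; exact ih
  | case3 lo hi h => rw [pvBS]; simp [h]

-- B's outer while loop: count a group, jump to the next leader by binary search
theorem pvJumpDec (n i j : Nat) (h : i < n) (hj : i + 1 ≤ j) : n - j < n - i := by omega

def pvLoopB (S : List Int) (L : Int) (n : Nat) (i : Nat) : Int :=
  if _h : i < n then 1 + pvLoopB S L n (pvBS S (S.getD i 0 + L) (i + 1) n) else 0
termination_by n - i
decreasing_by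
  exact pvJumpDec n i _ _h (pvBS_ge S (S.getD i 0 + L) (i + 1) n)

def MinGroup_alt (C : List Int) (L : Int) : Int :=
  let S := PySem.List.sorted C (fun x => x) false
  pvLoopB S L S.length 0

-- ===== PRECONDITION & SPEC =====
def Spec_MinGroup (C : List Int) (L : Int) (out : Int) : Prop := out = MinGroup_alt C L
instance (C : List Int) (L : Int) (out : Int) : Decidable (Spec_MinGroup C L out) := by unfold Spec_MinGroup; infer_instance

-- ===== CLAIM =====
def Claim_equal_MinGroup : Prop := ∀ (C : List Int) (L : Int), Dom_MinGroup C L → Spec_MinGroup C L (MinGroup C L)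

-- ===== LEMMAS AND PROOFS =====
-- the true boundary: least index ≥ lo whose element exceeds r (or S.length)
def pvFirst (S : List Int) (r : Int) (lo : Nat) : Nat :=
  lo + ((S.drop lo).takeWhile (fun x => decide (x ≤ r))).length

theorem pvFirst_ge (S : List Int) (r : Int) (lo : Nat) : lo ≤ pvFirst S r lo := Nat.le_add_right _ _

theorem pvFirst_le (S : List Int) (r : Int) (lo : Nat) (h : lo ≤ S.length) :
    pvFirst S r lo ≤ S.length := by
  have h1 : ∀ xs : List Int, (xs.takeWhile (fun x => decide (x ≤ r))).length ≤ xs.length := by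
    intro xs; induction xs with
    | nil => simp
    | cons x xs ih => by_cases hc : x ≤ r <;> simp [hc] <;> omega
  have h2 := h1 (S.drop lo)
  simp only [pvFirst]
  simp [List.length_drop] at h2
  omega

theorem pvFirst_step (S : List Int) (r : Int) (lo : Nat) (h : lo < S.length) :
    pvFirst S r lo = if S.getD lo 0 ≤ r then pvFirst S r (lo + 1) else lo := by
  have hd : S.drop lo = S[lo] :: S.drop (lo + 1) := (List.drop_eq_getElem_cons h)
  have hget : S.getD lo 0 = S[lo] := List.getD_eq_getElem S 0 h
  simp only [pvFirst, hd, List.takeWhile_cons, hget]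
  by_cases hc : S[lo] ≤ r <;> simp [hc] <;> omega

-- L2: an index mid ≥ lo whose element exceeds r bounds the boundary (no sortedness needed)
theorem pvFirst_le_of_gt (S : List Int) (r : Int) (mid : Nat) (hmid : mid < S.length)
    (hgt : ¬ S.getD mid 0 ≤ r) : ∀ lo, lo ≤ mid → pvFirst S r lo ≤ mid := by
  intro lo hle
  induction hd : mid - lo generalizing lo with
  | zero =>
    have : lo = mid := by omega
    subst this
    rw [pvFirst_step S r lo hmid, if_neg hgt]
  | succ k ih =>
    rw [pvFirst_step S r lo (by omega)]
    split
    · exact ih (lo + 1) (by omega) (by omega)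
    · exact hle

-- L1: if S is sorted and S[mid] ≤ r with mid ≥ lo, all of [lo,mid] is ≤ r, so the boundary is unchanged
theorem pvFirst_skip (S : List Int) (r : Int) (hs : ∀ p q, p ≤ q → q < S.length → S.getD p 0 ≤ S.getD q 0)
    (mid : Nat) (hmid : mid < S.length) (hle : S.getD mid 0 ≤ r) :
    ∀ lo, lo ≤ mid → pvFirst S r lo = pvFirst S r (mid + 1) := by
  intro lo h
  induction hd : mid - lo generalizing lo with
  | zero =>
    have : lo = mid := by omega
    subst this
    rw [pvFirst_step S r lo hmid, if_pos hle]
  | succ k ih =>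
    rw [pvFirst_step S r lo (by omega), if_pos (le_trans (hs lo mid (by omega) hmid) hle)]
    exact ih (lo + 1) (by omega) (by omega)

-- binary search computes the boundary, provided it lies within [lo, hi]
theorem pvBS_eq_first (S : List Int) (r : Int)
    (hs : ∀ p q, p ≤ q → q < S.length → S.getD p 0 ≤ S.getD q 0) :
    ∀ lo hi, hi ≤ S.length → pvFirst S r lo ≤ hi → pvBS S r lo hi = pvFirst S r lo := by
  intro lo hi
  induction lo, hi using pvBS.induct S r with
  | case1 lo hi h mid hle ih =>
    intro hhi hf
    rw [pvBS]
    simp only [h, dite_true]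
    simp only [mid] at hle ih ⊢
    rw [if_pos hle]
    have hmlt : (lo + hi) / 2 < S.length := by omega
    have hskip := pvFirst_skip S r hs ((lo + hi) / 2) hmlt hle lo (by omega)
    rw [ih hhi (by omega), ← hskip]
  | case2 lo hi h mid hgt ih =>
    intro hhi hf
    rw [pvBS]
    simp only [h, dite_true]
    simp only [mid] at hgt ih ⊢
    rw [if_neg hgt]
    have hmlt : (lo + hi) / 2 < S.length := by omega
    have hb := pvFirst_le_of_gt S r ((lo + hi) / 2) hmlt hgt lo (by omega)
    exact ih (by omega) hb
  | case3 lo hi h =>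
    intro hhi hf
    rw [pvBS]
    simp only [h, dite_false]
    have := pvFirst_ge S r lo
    omega

-- dropWhile as a drop at the takeWhile length
theorem drop_first (S : List Int) (r : Int) (lo : Nat) :
    S.drop (pvFirst S r lo) = pvDropRun r (S.drop lo) := by
  have h1 : ∀ xs : List Int, pvDropRun r xs = xs.dropWhile (fun x => decide (x ≤ r)) := by
    intro xs; induction xs with
    | nil => simp [pvDropRun]
    | cons x xs ih => by_cases hc : x ≤ r <;> simp [pvDropRun, hc, ih]
  set t := (S.drop lo).takeWhile (fun x => decide (x ≤ r)) with ht
  set d := (S.drop lo).dropWhile (fun x => decide (x ≤ r)) with hd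
  have hsplit : S.drop lo = t ++ d := by rw [ht, hd, List.takeWhile_append_dropWhile]
  have hdd : List.drop (lo + t.length) S = List.drop t.length (List.drop lo S) := by
    rw [List.drop_drop, Nat.add_comm]
  rw [h1, ← hd, pvFirst, ← ht, hdd, hsplit, List.drop_left]

-- B's jump loop equals A's nested loop on every suffix of the sorted list
theorem loopB_eq_loopA (S : List Int) (L : Int)
    (hs : ∀ p q, p ≤ q → q < S.length → S.getD p 0 ≤ S.getD q 0) :
    ∀ i, pvLoopB S L S.length i = pvLoopA L (S.drop i) := by
  intro i
  induction hd : S.length - i using Nat.strong_induction_on generalizing i with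
  | _ m ih =>
    by_cases h : i < S.length
    · have hdrop : S.drop i = S[i] :: S.drop (i + 1) := List.drop_eq_getElem_cons h
      have hget : S.getD i 0 = S[i] := List.getD_eq_getElem S 0 h
      rw [pvLoopB]
      simp only [h, dite_true]
      set r := S.getD i 0 + L with hr
      have hfle : pvFirst S r (i + 1) ≤ S.length := pvFirst_le S r (i + 1) (by omega)
      have hbs : pvBS S r (i + 1) S.length = pvFirst S r (i + 1) :=
        pvBS_eq_first S r hs (i + 1) S.length le_rfl hfle
      have hge : i + 1 ≤ pvFirst S r (i + 1) := pvFirst_ge S r (i + 1)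
      rw [hbs, ih (S.length - pvFirst S r (i + 1)) (by omega) _ rfl,
          drop_first, hdrop, pvLoopA, hr, hget]
    · rw [pvLoopB]
      simp only [h, dite_false]
      rw [List.drop_eq_nil_of_le (by omega), pvLoopA]

-- ===== VERDICT =====
theorem MinGroup_spec : Claim_equal_MinGroup := by
  intro C L _
  unfold Spec_MinGroup MinGroup MinGroup_alt
  have hs : ∀ p q, p ≤ q → q < (PySem.List.sorted C (fun x => x) false).length →
      (PySem.List.sorted C (fun x => x) false).getD p 0 ≤ (PySem.List.sorted C (fun x => x) false).getD q 0 := by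
    intro p q hpq hq
    rw [List.getD_eq_getElem _ 0 (by omega), List.getD_eq_getElem _ 0 hq]
    exact PySem.List.sorted_id_getElem_mono C hpq hq
  rw [loopB_eq_loopA _ L hs 0, List.drop_zero]
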